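-- pv_equiv track=rewrite | github.com/diegoami/DA_Hellofresh | recipes-etl/find_recipes_with_chili.py | has_chili
-- ===== SOURCE A (Python) =====
-- def has_chili(tokens):
--     """ True if any of the tokens in the list is chili, chilies or differs by one character from these words
--
--     Parameters:
--         tokens: a list of tokens from the ingredients
--
--     Returns:
--         True or False, if chili/chilies with at most one spelling error is found
--
--     """
--     def one_change(first, second):
--         if first == second:
--             return True
--         if len(first) == len(second):
--             count = 0
--             for i in range(len(first)):
--                 if first[i] != second[i]:
--                     count += 1
--                     if count > 1:
--                         return False
--             return True
--         if len(second) > len(first):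
--             first, second = second, first
--         gap = 0
--         if (len(first) == len(second)+1):
--             for i in range(len(second)):
--                 if first[i+gap] != second[i]:
--                    gap += 1
--                    if (gap > 1):
--                        return False
--             return True
--         return False
--     for tok in tokens:
--         tokl = tok.lower()
--         if (one_change(tokl, "chili") or one_change(tokl, "chilies") ):
--             return True
--     return False
-- ===== SOURCE B (Python) =====
-- def has_chili(tokens):
--     """ True if any of the tokens in the list is chili, chilies or differs by one character from these words """
--     words = ("chili", "chilies")
--
--     def within_one(s, t):
--         # Levenshtein distance at most 1 (one substitution, or one insertion/deletion)
--         if len(s) > len(t):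
--             s, t = t, s
--         if len(t) - len(s) > 1:
--             return False
--         if len(s) == len(t):
--             return sum(a != b for a, b in zip(s, t)) <= 1
--         # len(t) == len(s) + 1: deleting one character of t yields s
--         return any(t[:i] == s[:i] and t[i + 1:] == s[i:] for i in range(len(s) + 1))
--
--     return any(within_one(tok.lower(), w) for tok in tokens for w in words)
-- ===== Notes on version B (the rewrite author's own statement) =====
-- stated objective: simpler
-- what changed: B replaces A's stateful index/gap scanning loops with a direct 'within one edit' check: equal lengths compare mismatch count of zipped characters, length-difference-one is an any() over slice equalities (delete one character of the longer), fixing A's skip-scan bug on the way.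
-- intended difference: On lists where some lowercased token matches A's skip-scan pattern against 'chili'/'chilies' (matching prefix, then one character deleted AND the character right after it substituted - edit distance 2, e.g. 'cxyili') while no token is genuinely within one edit, A returns True but B returns False; B is intended since such tokens contain two spelling errors, not one. — e.g. on has_chili(["cxyili"]): A returns true, B returns false
import Mathlib
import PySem

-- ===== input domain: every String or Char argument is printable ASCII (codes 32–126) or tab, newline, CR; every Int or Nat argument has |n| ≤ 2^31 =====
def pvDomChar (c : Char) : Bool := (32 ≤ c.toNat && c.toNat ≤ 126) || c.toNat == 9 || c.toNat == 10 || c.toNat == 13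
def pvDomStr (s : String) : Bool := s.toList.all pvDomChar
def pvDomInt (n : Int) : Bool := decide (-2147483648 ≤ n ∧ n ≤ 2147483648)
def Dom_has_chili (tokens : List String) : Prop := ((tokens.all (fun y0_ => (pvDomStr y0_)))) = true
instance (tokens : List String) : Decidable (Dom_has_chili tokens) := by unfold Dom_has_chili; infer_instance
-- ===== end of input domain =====

-- B replaces A's stateful index/gap scanning with slice-based 'one edit away' checks; it intentionally
-- rejects A's skip-scan false positives (edit distance 2), stated in D_has_chili below.

-- ===== PORT A =====
-- tokl = tok.lower() as a List Char (helper shared by port A and D_has_chili below)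
def pvLow (t : String) : List Char := (PySem.Str.lower t).toList

-- 'for i in range(len(first)): if first[i] != second[i]: count += 1; if count > 1: return False'
-- ported as the structural recursion over the two equal-length lists with the count accumulator.
def pvEqCount : List Char → List Char → Nat → Bool
  | x :: xs, y :: ys, count =>
      if x ≠ y then
        if count + 1 > 1 then false
        else pvEqCount xs ys (count + 1)
      else pvEqCount xs ys count
  | _, _, _ => true

-- 'for i in range(len(second)): if first[i+gap] != second[i]: gap += 1; if gap > 1: return False'
-- ported keeping the remaining suffixes first[i+gap:], second[i:] as the state; incrementing gap
-- skips one further character of first (xs.tail), exactly Python's i+gap indexing.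
def pvGapLoop : List Char → List Char → Nat → Bool
  | x :: xs, y :: ys, gap =>
      if x ≠ y then
        if gap + 1 > 1 then false
        else pvGapLoop xs.tail ys (gap + 1)
      else pvGapLoop xs ys gap
  | _, _, _ => true

def pvOneChange (first second : List Char) : Bool :=
  if first = second then true
  else if first.length = second.length then pvEqCount first second 0
  else
    let p := if second.length > first.length then (second, first) else (first, second)
    if p.1.length = p.2.length + 1 then pvGapLoop p.1 p.2 0 else false

def has_chili : List String → Bool
  | [] => false
  | tok :: rest =>
      let tokl := pvLow tok
      if pvOneChange tokl "chili".toList || pvOneChange tokl "chilies".toList then true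
      else has_chili rest

-- ===== PORT B =====
-- sum(a != b for a, b in zip(s, t))
def pvMismatchSum (s t : List Char) : Nat :=
  ((s.zip t).map (fun (a, b) => if a != b then 1 else 0)).sum

-- any(t[:i] == s[:i] and t[i+1:] == s[i:] for i in range(len(s)+1))
def pvDelAny (s t : List Char) : Bool :=
  (List.range (s.length + 1)).any (fun i => t.take i == s.take i && t.drop (i + 1) == s.drop i)

def pvWithinOne (s t : List Char) : Bool :=
  let p := if s.length > t.length then (t, s) else (s, t)
  if p.2.length - p.1.length > 1 then false
  else if p.1.length = p.2.length then decide (pvMismatchSum p.1 p.2 ≤ 1)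
  else pvDelAny p.1 p.2

-- words = ("chili", "chilies")
def pvWords : List String := ["chili", "chilies"]

def has_chili_alt (tokens : List String) : Bool :=
  tokens.any (fun tok =>
    pvWords.any (fun w => pvWithinOne (PySem.Str.lower tok).toList w.toList))

-- ===== PRECONDITION & SPEC =====
-- pvNear d e f s: f is s with one extra character block: a common prefix of length i, then
-- f's next d characters replaced by the d-e characters of s there, then a common suffix
-- (d=1,e=0: one substitution; d=1,e=1: one deletion of f; d=2,e=1: A's skip-scan shape,
-- one deletion of f plus a free character right after it).
def pvNear (d e : Nat) (f s : List Char) : Prop :=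
  f.length = s.length + e ∧
  ∃ i ≤ s.length, f.take i = s.take i ∧ f.drop (i + d) = s.drop (i + d - e)

def pvTok (d : Nat) (u : List Char) : Prop :=
  ∃ w ∈ ["chili", "chilies"], pvNear 1 0 u w.toList ∨ pvNear d 1 u w.toList ∨ pvNear d 1 w.toList u

-- On these inputs A returns True though every token is ≥ 2 edits from chili/chilies (A's skip-scan
-- also accepts a deletion combined with a substitution right after it); B returns the intended False.
def D_has_chili (tokens : List String) : Prop :=
  ∃ t ∈ tokens.map pvLow, ∀ u ∈ tokens.map pvLow, pvTok 2 t ∧ ¬ pvTok 1 u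

instance (tokens : List String) : Decidable (D_has_chili tokens) := by
  unfold D_has_chili pvTok pvNear pvLow; infer_instance

def Spec_has_chili (tokens : List String) (out : Bool) : Prop :=
  ¬ D_has_chili tokens → out = has_chili_alt tokens
instance (tokens : List String) (out : Bool) : Decidable (Spec_has_chili tokens out) := by
  unfold Spec_has_chili; infer_instance

def pvDiffWitness_has_chili : List String := (["cxyili"])
def pvDiffWitnessOut_has_chili : Bool × Bool := (true, false)

-- ===== CLAIM (what is proved, stated in full; the proofs are below) =====
def Claim_unchanged_has_chili : Prop := ∀ (tokens : List String), Dom_has_chili tokens → Spec_has_chili tokens (has_chili tokens)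
def Claim_changed_has_chili : Prop := Dom_has_chili (pvDiffWitness_has_chili) ∧ D_has_chili (pvDiffWitness_has_chili) ∧ has_chili (pvDiffWitness_has_chili) = pvDiffWitnessOut_has_chili.1 ∧ has_chili_alt (pvDiffWitness_has_chili) = pvDiffWitnessOut_has_chili.2 ∧ pvDiffWitnessOut_has_chili.1 ≠ pvDiffWitnessOut_has_chili.2
def Claim_exact_has_chili : Prop := ∀ (tokens : List String), Dom_has_chili tokens → D_has_chili tokens → has_chili tokens ≠ has_chili_alt tokens

-- ===== LEMMAS AND PROOFS =====

-- Proof-side descriptions of the two per-token acceptances.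
def pvCloseP (u w : List Char) : Prop :=
  (u.length = w.length ∧ (u.zip w).countP (fun p => p.1 != p.2) ≤ 1) ∨
  (u.length = w.length + 1 ∧ ∃ i < w.length + 1, u.take i = w.take i ∧ u.drop (i + 1) = w.drop i) ∨
  (w.length = u.length + 1 ∧ ∃ i < u.length + 1, w.take i = u.take i ∧ w.drop (i + 1) = u.drop i)

-- A's skip-scan acceptance on a length-difference-one pair: a matching prefix, then one character of
-- the longer deleted with the character right after the deletion point left unconstrained.
def pvSkipP (u w : List Char) : Prop :=
  (u.length = w.length + 1 ∧ ∃ i < w.length + 1, u.take i = w.take i ∧ u.drop (i + 2) = w.drop (i + 1)) ∨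
  (w.length = u.length + 1 ∧ ∃ i < u.length + 1, w.take i = u.take i ∧ w.drop (i + 2) = u.drop (i + 1))

def pvAaccP (u w : List Char) : Prop :=
  (u.length = w.length ∧ (u.zip w).countP (fun p => p.1 != p.2) ≤ 1) ∨ pvSkipP u w

def pvGenTok (u : List Char) : Prop := pvCloseP u "chili".toList ∨ pvCloseP u "chilies".toList
def pvAaccTok (u : List Char) : Prop := pvAaccP u "chili".toList ∨ pvAaccP u "chilies".toList

-- On these inputs A returns True though every token is ≥ 2 edits from chili/chilies (A's skip-scan
-- also accepts a deletion combined with a substitution right after it); B returns the intended False.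


theorem pvEqCount_iff (s : List Char) : ∀ (t : List Char) (c : Nat), c ≤ 1 →
    (pvEqCount s t c = true ↔ c + (s.zip t).countP (fun p => p.1 != p.2) ≤ 1) := by
  induction s with
  | nil => intro t c hc; simp [pvEqCount]; omega
  | cons x xs ih =>
    intro t c hc
    cases t with
    | nil => simp [pvEqCount]; omega
    | cons y ys =>
      by_cases hxy : x = y
      · simp [pvEqCount, hxy, ih ys c hc]
      · rcases Nat.eq_or_lt_of_le hc with h | h
        · subst h
          simp [pvEqCount, hxy, List.countP_cons]
        · have hc0 : c = 0 := by omega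
          subst hc0
          simp [pvEqCount, hxy, List.countP_cons, ih ys 1 (by omega)]

theorem pvGapLoop_one_iff (s : List Char) : ∀ (f : List Char), f.length = s.length →
    (pvGapLoop f s 1 = true ↔ f = s) := by
  induction s with
  | nil => intro f hf; rw [List.length_nil, List.length_eq_zero_iff] at hf; simp [hf, pvGapLoop]
  | cons y ys ih =>
    intro f hf
    cases f with
    | nil => simp at hf
    | cons x xs =>
      by_cases hxy : x = y
      · simp [pvGapLoop, hxy, ih xs (by simpa using hf)]
      · simp [pvGapLoop, hxy]

theorem pvGapLoop_iff (s : List Char) : ∀ (f : List Char), f.length = s.length + 1 →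
    (pvGapLoop f s 0 = true ↔ ∃ i < s.length + 1, f.take i = s.take i ∧ f.drop (i + 2) = s.drop (i + 1)) := by
  induction s with
  | nil =>
    intro f hf
    match f, hf with
    | [x], _ =>
      exact iff_of_true (by simp [pvGapLoop]) ⟨0, by omega, by simp, by simp⟩
  | cons y ys ih =>
    intro f hf
    cases f with
    | nil => simp at hf
    | cons x xs =>
      have hxl : xs.length = ys.length + 1 := by simpa using hf
      by_cases hxy : x = y
      · rw [show pvGapLoop (x :: xs) (y :: ys) 0 = pvGapLoop xs ys 0 by simp [pvGapLoop, hxy]]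
        rw [ih xs hxl]
        constructor
        · rintro ⟨i, hi, h1, h2⟩
          exact ⟨i + 1, by simp only [List.length_cons]; omega, by simp [hxy, h1], by simpa using h2⟩
        · rintro ⟨i, hi, h1, h2⟩
          cases i with
          | zero =>
            refine ⟨0, by omega, by simp, ?_⟩
            have h2' : xs.drop 1 = ys := by simpa using h2
            calc xs.drop 2 = (xs.drop 1).drop 1 := by simp [List.drop_drop]
            _ = ys.drop 1 := by rw [h2']
          | succ j =>
            refine ⟨j, by simpa using hi, ?_, ?_⟩
            · have := h1; simp [List.take_succ_cons] at this; exact this.2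
            · simpa [show j + 1 + 2 = j + 2 + 1 by omega] using h2
      · rw [show pvGapLoop (x :: xs) (y :: ys) 0 = pvGapLoop xs.tail ys 1 by simp [pvGapLoop, hxy]]
        cases xs with
        | nil => simp at hxl
        | cons x' xs' =>
          rw [List.tail_cons, pvGapLoop_one_iff ys xs' (by simpa using hxl)]
          constructor
          · intro h; exact ⟨0, by omega, by simp, by simpa using h⟩
          · rintro ⟨i, hi, h1, h2⟩
            cases i with
            | zero => simpa using h2
            | succ j => exfalso; simp [List.take_succ_cons] at h1; exact hxy h1.1

theorem zip_self_countP (u : List Char) : (u.zip u).countP (fun p => p.1 != p.2) = 0 := by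
  induction u with
  | nil => rfl
  | cons x xs ih => simp [ih]

theorem pvOneChange_iff (u w : List Char) : pvOneChange u w = true ↔ pvAaccP u w := by
  unfold pvOneChange pvAaccP pvSkipP
  by_cases huw : u = w
  · subst huw
    exact iff_of_true (by simp) (Or.inl ⟨rfl, by simp [zip_self_countP u]⟩)
  · rw [if_neg huw]
    by_cases hlen : u.length = w.length
    · rw [if_pos hlen, pvEqCount_iff u w 0 (by omega)]
      constructor
      · intro h; exact Or.inl ⟨hlen, by omega⟩
      · rintro (⟨_, h⟩ | ⟨⟨h1, _⟩ | ⟨h1, _⟩⟩) <;> omega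
    · rw [if_neg hlen]
      by_cases hgt : w.length > u.length
      · simp only [if_pos hgt]
        by_cases hd : w.length = u.length + 1
        · rw [if_pos hd, pvGapLoop_iff u w hd]
          constructor
          · intro h; exact Or.inr (Or.inr ⟨hd, h⟩)
          · rintro (⟨h1, _⟩ | ⟨⟨h1, _⟩ | ⟨_, h⟩⟩)
            · omega
            · omega
            · exact h
        · rw [if_neg hd]
          constructor
          · intro h; simp at h
          · rintro (⟨h1, _⟩ | ⟨⟨h1, _⟩ | ⟨h1, _⟩⟩) <;> omega
      · simp only [if_neg hgt]
        by_cases hd : u.length = w.length + 1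
        · rw [if_pos hd, pvGapLoop_iff w u hd]
          constructor
          · intro h; exact Or.inr (Or.inl ⟨hd, h⟩)
          · rintro (⟨h1, _⟩ | ⟨⟨_, h⟩ | ⟨h1, _⟩⟩)
            · omega
            · exact h
            · omega
        · rw [if_neg hd]
          constructor
          · intro h; simp at h
          · rintro (⟨h1, _⟩ | ⟨⟨h1, _⟩ | ⟨h1, _⟩⟩) <;> omega

theorem pvMismatchSum_eq (s t : List Char) :
    pvMismatchSum s t = (s.zip t).countP (fun p => p.1 != p.2) := by
  unfold pvMismatchSum
  induction (s.zip t) with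
  | nil => rfl
  | cons x xs ih =>
    by_cases h : x.1 = x.2
    · simpa [List.countP_cons, h] using ih
    · rw [List.map_cons, List.sum_cons, ih, List.countP_cons]
      simp [h, Nat.add_comm]

theorem pvDelAny_iff (s t : List Char) :
    pvDelAny s t = true ↔ ∃ i < s.length + 1, t.take i = s.take i ∧ t.drop (i + 1) = s.drop i := by
  unfold pvDelAny
  simp [List.any_eq_true, List.mem_range]

theorem pvWithinOne_iff (u w : List Char) : pvWithinOne u w = true ↔ pvCloseP u w := by
  unfold pvWithinOne pvCloseP
  by_cases hgt : u.length > w.length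
  · simp only [if_pos hgt]
    by_cases hbig : u.length - w.length > 1
    · rw [if_pos hbig]
      constructor
      · intro h; simp at h
      · rintro (⟨h1, _⟩ | ⟨⟨h1, _⟩ | ⟨h1, _⟩⟩) <;> omega
    · rw [if_neg hbig, if_neg (by omega : ¬ w.length = u.length)]
      have hd : u.length = w.length + 1 := by omega
      rw [pvDelAny_iff w u]
      constructor
      · intro h; exact Or.inr (Or.inl ⟨hd, h⟩)
      · rintro (⟨h1, _⟩ | ⟨⟨_, h⟩ | ⟨h1, _⟩⟩)
        · omega
        · exact h
        · omega
  · simp only [if_neg hgt]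
    by_cases heq : u.length = w.length
    · rw [if_neg (by omega : ¬ w.length - u.length > 1), if_pos heq]
      rw [pvMismatchSum_eq u w]
      constructor
      · intro h; exact Or.inl ⟨heq, by simpa using h⟩
      · rintro (⟨_, h⟩ | ⟨⟨h1, _⟩ | ⟨h1, _⟩⟩)
        · simpa using h
        · omega
        · omega
    · by_cases hbig : w.length - u.length > 1
      · rw [if_pos hbig]
        constructor
        · intro h; simp at h
        · rintro (⟨h1, _⟩ | ⟨⟨h1, _⟩ | ⟨h1, _⟩⟩) <;> omega
      · rw [if_neg hbig, if_neg heq]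
        have hd : w.length = u.length + 1 := by omega
        rw [pvDelAny_iff u w]
        constructor
        · intro h; exact Or.inr (Or.inr ⟨hd, h⟩)
        · rintro (⟨h1, _⟩ | ⟨⟨h1, _⟩ | ⟨_, h⟩⟩)
          · omega
          · omega
          · exact h

theorem hasA_iff (tokens : List String) :
    has_chili tokens = true ↔ ∃ t ∈ tokens, pvAaccTok (PySem.Str.lower t).toList := by
  induction tokens with
  | nil => simp [has_chili]
  | cons t rest ih =>
    simp only [has_chili, pvLow]
    by_cases h : (pvOneChange (PySem.Str.lower t).toList "chili".toList ||
        pvOneChange (PySem.Str.lower t).toList "chilies".toList) = true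
    · rw [if_pos h]
      have ha : pvAaccTok (PySem.Str.lower t).toList := by
        rcases (Bool.or_eq_true _ _).mp h with h' | h'
        · exact Or.inl ((pvOneChange_iff _ _).mp h')
        · exact Or.inr ((pvOneChange_iff _ _).mp h')
      exact iff_of_true rfl ⟨t, by simp, ha⟩
    · rw [if_neg h, ih]
      constructor
      · rintro ⟨t', ht', ha⟩; exact ⟨t', by simp [ht'], ha⟩
      · rintro ⟨t', ht', ha⟩
        rcases List.mem_cons.mp ht' with rfl | hm
        · exfalso; apply h
          rcases ha with ha | ha
          · exact (Bool.or_eq_true _ _).mpr (Or.inl ((pvOneChange_iff _ _).mpr ha))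
          · exact (Bool.or_eq_true _ _).mpr (Or.inr ((pvOneChange_iff _ _).mpr ha))
        · exact ⟨t', hm, ha⟩

theorem hasB_iff (tokens : List String) :
    has_chili_alt tokens = true ↔ ∃ t ∈ tokens, pvGenTok (PySem.Str.lower t).toList := by
  unfold has_chili_alt pvWords
  rw [List.any_eq_true]
  apply exists_congr; intro t
  apply and_congr_right; intro _
  simp only [List.any_cons, List.any_nil, Bool.or_false, Bool.or_eq_true]
  rw [pvWithinOne_iff, pvWithinOne_iff]
  exact Iff.rfl

theorem close_imp_aaccP (u w : List Char) : pvCloseP u w → pvAaccP u w := by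
  rintro (h | ⟨hd, i, hi, h1, h2⟩ | ⟨hd, i, hi, h1, h2⟩)
  · exact Or.inl h
  · refine Or.inr (Or.inl ⟨hd, i, hi, h1, ?_⟩)
    calc u.drop (i + 2) = (u.drop (i + 1)).drop 1 := by simp [List.drop_drop]
    _ = w.drop (i + 1) := by rw [h2]; simp [List.drop_drop]
  · refine Or.inr (Or.inr ⟨hd, i, hi, h1, ?_⟩)
    calc w.drop (i + 2) = (w.drop (i + 1)).drop 1 := by simp [List.drop_drop]
    _ = u.drop (i + 1) := by rw [h2]; simp [List.drop_drop]

theorem gen_imp_aacc (u : List Char) : pvGenTok u → pvAaccTok u := by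
  rintro (h | h)
  · exact Or.inl (close_imp_aaccP _ _ h)
  · exact Or.inr (close_imp_aaccP _ _ h)


theorem zip_countP_zero_iff (u : List Char) : ∀ (w : List Char), u.length = w.length →
    ((u.zip w).countP (fun p => p.1 != p.2) = 0 ↔ u = w) := by
  induction u with
  | nil =>
    intro w h
    cases w with
    | nil => simp
    | cons y ys => simp at h
  | cons x xs ih =>
    intro w h
    cases w with
    | nil => simp at h
    | cons y ys =>
      by_cases hxy : x = y
      · simp [List.countP_cons, hxy, ih ys (by simpa using h)]
      · simp [List.countP_cons, hxy]

theorem countP_le_one_iff (u : List Char) : ∀ (w : List Char), u.length = w.length →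
    ((u.zip w).countP (fun p => p.1 != p.2) ≤ 1 ↔
      ∃ i < w.length + 1, u.take i = w.take i ∧ u.drop (i + 1) = w.drop (i + 1)) := by
  induction u with
  | nil =>
    intro w h
    cases w with
    | nil => exact iff_of_true (by simp) ⟨0, by omega, by simp, by simp⟩
    | cons y ys => simp at h
  | cons x xs ih =>
    intro w h
    cases w with
    | nil => simp at h
    | cons y ys =>
      have hlen : xs.length = ys.length := by simpa using h
      by_cases hxy : x = y
      · rw [show ((x :: xs).zip (y :: ys)).countP (fun p => p.1 != p.2) =
            (xs.zip ys).countP (fun p => p.1 != p.2) by simp [List.countP_cons, hxy]]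
        rw [ih ys hlen]
        constructor
        · rintro ⟨i, hi, h1, h2⟩
          exact ⟨i + 1, by simp only [List.length_cons]; omega, by simp [hxy, h1], by simpa using h2⟩
        · rintro ⟨i, hi, h1, h2⟩
          cases i with
          | zero =>
            have hxy2 : xs = ys := by simpa using h2
            exact ⟨0, by omega, by simp, by rw [hxy2]⟩
          | succ j =>
            refine ⟨j, by simpa using hi, ?_, ?_⟩
            · have := h1; simp [List.take_succ_cons] at this; exact this.2
            · simpa using h2
      · rw [show ((x :: xs).zip (y :: ys)).countP (fun p => p.1 != p.2) =
            (xs.zip ys).countP (fun p => p.1 != p.2) + 1 by simp [List.countP_cons, hxy]]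
        constructor
        · intro hc
          have h0 : xs = ys := (zip_countP_zero_iff xs ys hlen).mp (by omega)
          exact ⟨0, by omega, by simp, by simpa using congrArg (List.drop 1) (congrArg (x :: ·) h0)⟩
        · rintro ⟨i, hi, h1, h2⟩
          cases i with
          | zero =>
            have h0 : xs = ys := by simpa using h2
            have := (zip_countP_zero_iff xs ys hlen).mpr h0
            omega
          | succ j => exfalso; simp [List.take_succ_cons] at h1; exact hxy h1.1

theorem near10_iff (u w : List Char) :
    pvNear 1 0 u w ↔ u.length = w.length ∧ (u.zip w).countP (fun p => p.1 != p.2) ≤ 1 := by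
  unfold pvNear
  constructor
  · rintro ⟨h, hex⟩
    exact ⟨by simpa using h, (countP_le_one_iff u w (by simpa using h)).mpr (by simpa using hex)⟩
  · rintro ⟨h, hc⟩
    exact ⟨by simpa using h, by simpa using (countP_le_one_iff u w h).mp hc⟩

theorem near11_iff (f s : List Char) :
    pvNear 1 1 f s ↔ f.length = s.length + 1 ∧
      ∃ i < s.length + 1, f.take i = s.take i ∧ f.drop (i + 1) = s.drop i := by
  unfold pvNear
  simp

theorem near21_iff (f s : List Char) :
    pvNear 2 1 f s ↔ f.length = s.length + 1 ∧
      ∃ i < s.length + 1, f.take i = s.take i ∧ f.drop (i + 2) = s.drop (i + 1) := by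
  unfold pvNear
  simp

theorem tok1_iff (u : List Char) : pvTok 1 u ↔ pvGenTok u := by
  unfold pvTok pvGenTok pvCloseP
  simp only [List.mem_cons, List.not_mem_nil, or_false, exists_eq_or_imp, exists_eq_left,
    near10_iff, near11_iff]

theorem tok2_iff (u : List Char) : pvTok 2 u ↔ pvAaccTok u := by
  unfold pvTok pvAaccTok pvAaccP pvSkipP
  simp only [List.mem_cons, List.not_mem_nil, or_false, exists_eq_or_imp, exists_eq_left,
    near10_iff, near21_iff]

-- ===== VERDICT (by name: the statement is the Claim_ definition above) =====
theorem has_chili_spec : Claim_unchanged_has_chili := by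
  unfold Claim_unchanged_has_chili
  intro tokens _
  unfold Spec_has_chili
  intro hD
  by_cases hB : has_chili_alt tokens = true
  · rcases (hasB_iff tokens).mp hB with ⟨t, ht, hg⟩
    have hA : has_chili tokens = true := (hasA_iff tokens).mpr ⟨t, ht, gen_imp_aacc _ hg⟩
    rw [hA, hB]
  · have hB' : has_chili_alt tokens = false := by simpa using hB
    by_cases hA : has_chili tokens = true
    · exfalso
      rcases (hasA_iff tokens).mp hA with ⟨t, ht, ha⟩
      apply hD
      refine ⟨pvLow t, List.mem_map_of_mem ht, ?_⟩
      intro u hu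
      refine ⟨(tok2_iff _).mpr ha, ?_⟩
      intro hg
      obtain ⟨t', ht', rfl⟩ := List.mem_map.mp hu
      exact hB ((hasB_iff tokens).mpr ⟨t', ht', (tok1_iff _).mp hg⟩)
    · rw [Bool.not_eq_true] at hA
      rw [hA, hB']

theorem has_chili_changed : Claim_changed_has_chili := by
  unfold Claim_changed_has_chili; decide

theorem has_chili_tight : Claim_exact_has_chili := by
  unfold Claim_exact_has_chili
  intro tokens _ hD
  rcases hD with ⟨u, hu, hall⟩
  obtain ⟨t, ht, rfl⟩ := List.mem_map.mp hu
  have ha := (hall _ (List.mem_map_of_mem ht)).1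
  have hA : has_chili tokens = true := (hasA_iff tokens).mpr ⟨t, ht, (tok2_iff _).mp ha⟩
  have hB : has_chili_alt tokens = false := by
    rw [Bool.eq_false_iff]
    intro hB
    rcases (hasB_iff tokens).mp hB with ⟨t', ht', hg⟩
    exact (hall (pvLow t') (List.mem_map_of_mem ht')).2 ((tok1_iff _).mpr hg)
  rw [hA, hB]
  simp
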